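-- pv_equiv track=rewrite | github.com/aLVINlEE9/auto-eval | main.py | x_axis_gen
-- ===== SOURCE A (Python) =====
-- def x_axis_gen(set):
-- 	i = 0
-- 	a = 204
-- 	b = 220
-- 	while True:
-- 		if i == set:
-- 			return a
-- 		a += 30
-- 		i += 1
-- 		if i == set:
-- 			return b
-- 		b += 30
-- 		i += 1
-- ===== SOURCE B (Python) =====
-- def x_axis_gen(set):
--     # closed form: the loop returns a-track values on even indices, b-track on odd
--     if set % 2 == 0:
--         return 204 + 15 * set
--     return 220 + 15 * (set - 1)
-- ===== Notes on version B (the rewrite author's own statement) =====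
-- stated objective: faster
-- what changed: Replaced the unbounded two-track counting loop by a closed-form arithmetic formula chosen by the parity of set.
-- outside the precondition, e.g. on x_axis_gen(-1): A does not finish within the time limit, B returns 190
import Mathlib
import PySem

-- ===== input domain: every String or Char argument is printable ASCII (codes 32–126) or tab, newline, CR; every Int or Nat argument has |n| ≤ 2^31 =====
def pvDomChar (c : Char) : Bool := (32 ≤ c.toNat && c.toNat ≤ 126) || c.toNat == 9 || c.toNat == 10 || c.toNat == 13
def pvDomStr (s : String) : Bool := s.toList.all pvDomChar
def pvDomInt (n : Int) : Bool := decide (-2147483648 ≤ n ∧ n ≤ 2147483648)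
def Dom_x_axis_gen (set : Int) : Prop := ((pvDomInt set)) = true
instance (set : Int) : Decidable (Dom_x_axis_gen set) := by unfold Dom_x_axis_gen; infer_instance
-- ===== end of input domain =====

-- B replaces A's unbounded counting loop by a parity-based closed-form formula (asymptotically faster).


-- ===== PORT A =====
-- literal transliteration of A's 'while True' loop; the 'set ≤ i' branch is only a
-- totality guard for the case where the Python loop never terminates (set < 0)
def x_axis_gen_loop (set i a b : Int) : Int :=
  if i = set then a
  else if i + 1 = set then b
  else if h : set ≤ i then 0
  else x_axis_gen_loop set (i + 2) (a + 30) (b + 30)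
termination_by (set - i).toNat
decreasing_by
  have : i < set := lt_of_not_ge h
  omega

def x_axis_gen (set : Int) : Int := x_axis_gen_loop set 0 204 220

-- ===== PORT B =====
def x_axis_gen_alt (set : Int) : Int :=
  if PySem.Int.mod set 2 = 0 then 204 + 15 * set
  else 220 + 15 * (set - 1)

-- ===== PRECONDITION & SPEC =====
-- Pre_ excludes set < 0, on which A's while-loop never terminates (diverges)
def Pre_x_axis_gen (set : Int) : Prop := 0 ≤ set
instance (set : Int) : Decidable (Pre_x_axis_gen set) := by unfold Pre_x_axis_gen; infer_instance
def pvWitness_x_axis_gen : Int := 5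

def Spec_x_axis_gen (set : Int) (out : Int) : Prop := out = x_axis_gen_alt set
instance (set : Int) (out : Int) : Decidable (Spec_x_axis_gen set out) := by unfold Spec_x_axis_gen; infer_instance

-- ===== CLAIM =====
def Claim_equal_x_axis_gen : Prop := ∀ (set : Int), Dom_x_axis_gen set → Pre_x_axis_gen set → Spec_x_axis_gen set (x_axis_gen set)

-- ===== LEMMAS AND PROOFS =====
-- loop invariant: for i ≤ set, the loop returns a + 15*(set-i) when set-i is even,
-- b + 15*(set-i-1) when odd
theorem x_axis_gen_loop_eq (n : ℕ) : ∀ (set i a b : Int), set - i = (n : Int) →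
    x_axis_gen_loop set i a b =
      if (n : Int) % 2 = 0 then a + 15 * (n : Int) else b + 15 * ((n : Int) - 1) := by
  induction n using Nat.strong_induction_on with
  | _ n ih =>
    intro set i a b hn
    rw [x_axis_gen_loop]
    by_cases h0 : i = set
    · simp only [h0]
      have : (n : Int) = 0 := by omega
      simp [this]
    · rw [if_neg h0]
      by_cases h1 : i + 1 = set
      · rw [if_pos h1]
        have : (n : Int) = 1 := by omega
        simp [this]
      · rw [if_neg h1]
        have hlt : i < set := by omega
        have h2 : ¬ set ≤ i := by omega
        rw [dif_neg h2]
        have hn2 : 2 ≤ n := by omega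
        have : set - (i + 2) = ((n - 2 : ℕ) : Int) := by omega
        rw [ih (n - 2) (by omega) set (i + 2) (a + 30) (b + 30) this]
        have hmod : ((n - 2 : ℕ) : Int) % 2 = (n : Int) % 2 := by omega
        rw [hmod]
        split_ifs <;> omega

-- ===== VERDICT =====
theorem x_axis_gen_spec : Claim_equal_x_axis_gen := by
  intro set _ hpre
  have hp : (0:Int) ≤ set := hpre
  unfold Spec_x_axis_gen x_axis_gen x_axis_gen_alt
  have h : set - 0 = ((set.toNat : ℕ) : Int) := by omega
  rw [x_axis_gen_loop_eq set.toNat set 0 204 220 h]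
  have hs : ((set.toNat : ℕ) : Int) = set := by omega
  rw [hs]
  have hm : PySem.Int.mod set 2 = set % 2 := by
    simp [PySem.Int.mod, Int.fmod_eq_emod]
  rw [hm]
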